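-- pv_equiv track=rewrite | github.com/ariguz06/lab | main.py | build_ancestors
-- ===== SOURCE A (Python) =====
-- def build_ancestors(bags, parent):
--     anc = {}
--     #Root has parent[v] == None. Can be multiple roots, we handle all
--     def get_anc(v):
--         if v in anc:
--             return anc[v]
--         if parent[v] is None:
--             anc[v] = [v]
--         else:
--             anc[v] = get_anc(parent[v]) + [v]
--         return anc[v]
--
--     for v in bags.keys():
--         get_anc(v)
--
--     return anc
-- ===== SOURCE B (Python) =====
-- def build_ancestors(bags, parent):
--     # Iterative bottom-up walk: climb the parent chain collecting unseen nodes,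
--     # then unwind, extending the known prefix path, instead of memoized recursion.
--     result = {}
--     for v in bags:
--         chain = []
--         cur = v
--         while cur not in result and parent[cur] is not None:
--             chain.append(cur)
--             cur = parent[cur]
--         if cur in result:
--             path = result[cur]
--         else:
--             path = [cur]
--             result[cur] = path
--         for node in reversed(chain):
--             path = path + [node]
--             result[node] = path
--     return result
-- ===== Notes on version B (the rewrite author's own statement) =====
-- stated objective: alternative
-- what changed: Replaced the memoized recursive get_anc closure by an explicit bottom-up while-loop that climbs the parent chain collecting unseen nodes and then unwinds, extending the known prefix path node by node.
import Mathlib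
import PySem

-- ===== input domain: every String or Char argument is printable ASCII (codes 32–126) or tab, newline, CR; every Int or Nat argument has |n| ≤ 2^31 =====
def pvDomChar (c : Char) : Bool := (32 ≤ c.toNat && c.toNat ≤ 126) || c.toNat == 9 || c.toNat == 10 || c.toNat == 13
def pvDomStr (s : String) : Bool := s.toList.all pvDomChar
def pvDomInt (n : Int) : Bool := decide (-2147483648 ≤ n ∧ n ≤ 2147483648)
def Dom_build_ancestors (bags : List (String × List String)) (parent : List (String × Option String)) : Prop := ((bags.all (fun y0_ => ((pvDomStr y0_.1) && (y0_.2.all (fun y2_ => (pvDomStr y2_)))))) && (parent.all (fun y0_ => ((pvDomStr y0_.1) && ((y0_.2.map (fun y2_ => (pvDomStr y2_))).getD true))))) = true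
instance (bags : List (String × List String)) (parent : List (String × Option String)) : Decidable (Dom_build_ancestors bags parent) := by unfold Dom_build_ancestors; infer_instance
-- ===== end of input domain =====

-- B replaces A's memoized recursive helper by an explicit bottom-up climb of the parent
-- chain followed by an unwinding pass; same cost, different decomposition (objective: alternative).


-- ===== PORT A =====
-- get_anc: memoized recursion; the fuel (parent.length + 1) is only a termination bound —
-- under Pre_ every parent chain reaches a root in at most parent.length steps, so it never binds.
def getAncA (parent : List (String × Option String)) :
    Nat → PySem.Dict String (List String) → String →
    Option (PySem.Dict String (List String) × List String)
  | 0, _, _ => none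
  | fuel + 1, anc, v =>
    match anc.get? v with
    | some l => some (anc, l)
    | none =>
      match List.lookup v parent with
      | none => none                                   -- KeyError parent[v]
      | some none => some (anc.insert v [v], [v])
      | some (some p) =>
        match getAncA parent fuel anc p with
        | none => none
        | some (anc', pl) => some (anc'.insert v (pl ++ [v]), pl ++ [v])

def build_ancestors (bags : List (String × List String)) (parent : List (String × Option String)) : List (String × List String) :=
  match bags.foldl
      (fun st kv =>
        match st with
        | none => none
        | some anc => (getAncA parent (parent.length + 1) anc kv.1).map (·.1))
      (some (PySem.Dict.empty : PySem.Dict String (List String))) with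
  | none => []
  | some anc => anc.items

-- ===== PORT B =====
-- while-loop climbing the parent chain (fuel is the same harmless termination bound)
def climbB (parent : List (String × Option String)) :
    Nat → PySem.Dict String (List String) → List String → String →
    Option (List String × String)
  | 0, _, _, _ => none
  | fuel + 1, res, chain, cur =>
    if res.contains cur then some (chain, cur)
    else
      match List.lookup cur parent with
      | none => none                                   -- KeyError parent[cur]
      | some none => some (chain, cur)
      | some (some p) => climbB parent fuel res (chain ++ [cur]) p

-- the body of B's for-loop: climb, then unwind extending the known prefix path
def stepB (parent : List (String × Option String))
    (res : PySem.Dict String (List String)) (v : String) :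
    Option (PySem.Dict String (List String)) :=
  match climbB parent (parent.length + 1) res [] v with
  | none => none
  | some (chain, cur) =>
    let pr := if res.contains cur then (res, res.getD cur []) else (res.insert cur [cur], [cur])
    some ((chain.reverse.foldl
      (fun st node => (st.1.insert node (st.2 ++ [node]), st.2 ++ [node])) pr).1)

def build_ancestors_alt (bags : List (String × List String)) (parent : List (String × Option String)) : List (String × List String) :=
  match bags.foldl
      (fun st kv =>
        match st with
        | none => none
        | some res => stepB parent res kv.1)
      (some (PySem.Dict.empty : PySem.Dict String (List String))) with
  | none => []
  | some res => res.items

-- ===== PRECONDITION & SPEC =====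
-- chainOk parent fuel v is a property of the INPUT mapping only (it builds no paths and no
-- dict): the parent chain from v reaches a root (parent[x] = None) within fuel steps, every
-- visited node being present as a key of parent — i.e. v's ancestry is well-founded.
def chainOk (parent : List (String × Option String)) : Nat → String → Bool
  | 0, _ => false
  | fuel + 1, v =>
    match List.lookup v parent with
    | none => false
    | some none => true
    | some (some p) => chainOk parent fuel p

-- Pre_ excludes exactly the inputs where Python A raises: KeyError (a chain node missing from
-- parent) or unbounded recursion (a cyclic parent chain).  A terminating chain visits distinct
-- keys of parent, hence has at most parent.length nodes, so the fuel bound excludes nothing else.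
def Pre_build_ancestors (bags : List (String × List String)) (parent : List (String × Option String)) : Prop :=
  bags.all (fun kv => chainOk parent (parent.length + 1) kv.1) = true
instance (bags : List (String × List String)) (parent : List (String × Option String)) : Decidable (Pre_build_ancestors bags parent) := by unfold Pre_build_ancestors; infer_instance

def pvWitness_build_ancestors : (List (String × List String)) × (List (String × Option String)) :=
  ([("b", ["x"])], [("a", none), ("b", some "a")])

def Spec_build_ancestors (bags : List (String × List String)) (parent : List (String × Option String)) (out : List (String × List String)) : Prop := out = build_ancestors_alt bags parent
instance (bags : List (String × List String)) (parent : List (String × Option String)) (out : List (String × List String)) : Decidable (Spec_build_ancestors bags parent out) := by unfold Spec_build_ancestors; infer_instance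

-- ===== CLAIM (what is proved, stated in full; the proofs are below) =====
def Claim_equal_build_ancestors : Prop := ∀ (bags : List (String × List String)) (parent : List (String × Option String)), Dom_build_ancestors bags parent → Pre_build_ancestors bags parent → Spec_build_ancestors bags parent (build_ancestors bags parent)

-- ===== LEMMAS AND PROOFS =====

-- the root-to-node path of v, computed (without memo) with the given fuel
def pathOf (parent : List (String × Option String)) : Nat → String → Option (List String)
  | 0, _ => none
  | fuel + 1, v =>
    match List.lookup v parent with
    | none => none
    | some none => some [v]
    | some (some p) => (pathOf parent fuel p).map (· ++ [v])

def valOf (parent : List (String × Option String)) (v : String) : List String :=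
  (pathOf parent (parent.length + 1) v).getD []

-- the nodes on v's chain not yet in anc, listed top-down
def miss (parent : List (String × Option String)) (anc : PySem.Dict String (List String)) :
    Nat → String → List String
  | 0, _ => []
  | fuel + 1, v =>
    if (anc.get? v).isSome then []
    else
      match List.lookup v parent with
      | none => []
      | some none => [v]
      | some (some p) => miss parent anc fuel p ++ [v]

def insList (parent : List (String × Option String)) (d : PySem.Dict String (List String))
    (ks : List String) : PySem.Dict String (List String) :=
  ks.foldl (fun d k => d.insert k (valOf parent k)) d

def AncInv (parent : List (String × Option String)) (anc : PySem.Dict String (List String)) : Prop :=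
  ∀ k l, anc.get? k = some l → pathOf parent (parent.length + 1) k = some l

-- ks lists, top-down, a segment of a parent chain hanging below s
def linked (parent : List (String × Option String)) : String → List String → Prop
  | _, [] => True
  | s, x :: xs => List.lookup x parent = some (some s) ∧ linked parent x xs

theorem chainOk_pathOf_mono (parent : List (String × Option String)) :
    ∀ (f f' : Nat) (v : String), chainOk parent f v = true → f ≤ f' →
      chainOk parent f' v = true ∧ pathOf parent f' v = pathOf parent f v := by
  intro f
  induction f with
  | zero => intro f' v h; simp [chainOk] at h
  | succ f ih =>
    intro f' v h hle
    obtain ⟨f'', rfl⟩ : ∃ f'', f' = f'' + 1 := ⟨f' - 1, by omega⟩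
    simp only [chainOk, pathOf] at h ⊢
    cases hl : List.lookup v parent with
    | none => simp [hl] at h
    | some o =>
      cases o with
      | none => simp
      | some p =>
        simp only [hl] at h ⊢
        obtain ⟨h1, h2⟩ := ih f'' p h (by omega)
        simp [h1, h2]

theorem pathOf_isSome (parent : List (String × Option String)) :
    ∀ (f : Nat) (v : String), chainOk parent f v = true → (pathOf parent f v).isSome := by
  intro f
  induction f with
  | zero => intro v h; simp [chainOk] at h
  | succ f ih =>
    intro v h
    simp only [chainOk, pathOf] at h ⊢
    cases hl : List.lookup v parent with
    | none => simp [hl] at h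
    | some o =>
      cases o with
      | none => simp
      | some p =>
        simp only [hl] at h ⊢
        have := ih p h
        simp [Option.isSome_map]
        exact this

theorem valOf_root (parent : List (String × Option String)) (v : String)
    (hl : List.lookup v parent = some none) : valOf parent v = [v] := by
  simp [valOf, pathOf, hl]

theorem valOf_step (parent : List (String × Option String)) (v p : String) (f : Nat)
    (hl : List.lookup v parent = some (some p))
    (hc : chainOk parent f p = true) (hf : f ≤ parent.length) :
    valOf parent v = valOf parent p ++ [v] := by
  have h1 := chainOk_pathOf_mono parent f parent.length p hc hf
  have h2 := chainOk_pathOf_mono parent f (parent.length + 1) p hc (by omega)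
  obtain ⟨l, hl0⟩ := Option.isSome_iff_exists.mp (pathOf_isSome parent f p hc)
  have e1 : pathOf parent (parent.length + 1) v = (pathOf parent f p).map (· ++ [v]) := by
    simp only [pathOf, hl, h1.2]
  rw [valOf, valOf, e1, h2.2, hl0]
  rfl

theorem miss_mem_chainOk (parent : List (String × Option String)) :
    ∀ (f : Nat) (anc : PySem.Dict String (List String)) (v : String),
      chainOk parent f v = true → f ≤ parent.length + 1 →
      ∀ k ∈ miss parent anc f v, chainOk parent (parent.length + 1) k = true := by
  intro f
  induction f with
  | zero => intro anc v h; simp [chainOk] at h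
  | succ f ih =>
    intro anc v h hf k hk
    simp only [chainOk] at h
    simp only [miss] at hk
    split at hk
    · simp at hk
    · cases hl : List.lookup v parent with
      | none => simp [hl] at h
      | some o =>
        cases o with
        | none =>
          simp only [hl, List.mem_singleton] at hk
          subst hk
          exact (chainOk_pathOf_mono parent (f + 1) (parent.length + 1) k
            (by simp [chainOk, hl]) hf).1
        | some p =>
          simp only [hl] at h hk
          rcases List.mem_append.mp hk with hk | hk
          · exact ih anc p h (by omega) k hk
          · rw [List.mem_singleton] at hk
            subst hk
            exact (chainOk_pathOf_mono parent (f + 1) (parent.length + 1) k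
              (by simp [chainOk, hl, h]) hf).1

theorem ancInv_insert (parent : List (String × Option String))
    (res : PySem.Dict String (List String)) (k : String)
    (hI : AncInv parent res) (hc : chainOk parent (parent.length + 1) k = true) :
    AncInv parent (res.insert k (valOf parent k)) := by
  intro k' l h
  rw [PySem.Dict.get?_insert] at h
  split at h
  · rename_i heq
    rw [heq]
    obtain ⟨l0, hl0⟩ := Option.isSome_iff_exists.mp (pathOf_isSome parent _ k hc)
    have hv : valOf parent k = l0 := by simp [valOf, hl0]
    injection h with h
    rw [hl0, ← h, hv]
  · exact hI k' l h

theorem ancInv_insList (parent : List (String × Option String)) :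
    ∀ (ks : List String) (res : PySem.Dict String (List String)),
      AncInv parent res → (∀ k ∈ ks, chainOk parent (parent.length + 1) k = true) →
      AncInv parent (insList parent res ks) := by
  intro ks
  induction ks with
  | nil => intro res hI _; exact hI
  | cons k ks ih =>
    intro res hI hks
    simp only [insList, List.foldl_cons]
    exact ih _ (ancInv_insert parent res k hI (hks k (by simp))) (fun k' hk' => hks k' (by simp [hk']))

theorem getAncA_eq (parent : List (String × Option String)) :
    ∀ (f : Nat) (res : PySem.Dict String (List String)) (v : String),
      AncInv parent res → chainOk parent f v = true → f ≤ parent.length + 1 →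
      getAncA parent f res v = some (insList parent res (miss parent res f v), valOf parent v) := by
  intro f
  induction f with
  | zero => intro res v _ h; simp [chainOk] at h
  | succ f ih =>
    intro res v hI h hf
    simp only [chainOk] at h
    simp only [getAncA, miss]
    cases hmem : res.get? v with
    | some l =>
      have hv : pathOf parent (parent.length + 1) v = some l := hI v l hmem
      simp [valOf, hv, insList]
    | none =>
      cases hl : List.lookup v parent with
      | none => simp [hl] at h
      | some o =>
        cases o with
        | none =>
          simp [insList, valOf_root parent v hl]
        | some p =>
          simp only [hl] at h
          have hv : valOf parent v = valOf parent p ++ [v] :=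
            valOf_step parent v p f hl h (by omega)
          simp [ih res p hI h (by omega), insList, List.foldl_append, hv]

theorem linked_snoc (parent : List (String × Option String)) :
    ∀ (ks : List String) (s c : String), linked parent s ks →
      List.lookup c parent = some (some (ks.getLast?.getD s)) →
      linked parent s (ks ++ [c]) := by
  intro ks
  induction ks with
  | nil => intro s c _ hc; simp at hc; exact ⟨hc, trivial⟩
  | cons x xs ih =>
    intro s c hlk hc
    obtain ⟨h1, h2⟩ := hlk
    refine ⟨h1, ih x c h2 ?_⟩
    cases xs with
    | nil => simpa using hc
    | cons y ys => simpa using hc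

theorem unwind_eq (parent : List (String × Option String)) :
    ∀ (ks : List String) (f : Nat) (s : String) (d : PySem.Dict String (List String)),
      chainOk parent f s = true → f + ks.length ≤ parent.length + 1 → linked parent s ks →
      (ks.foldl (fun st node => (st.1.insert node (st.2 ++ [node]), st.2 ++ [node]))
          (d, valOf parent s)).1 = insList parent d ks := by
  intro ks
  induction ks with
  | nil => intro f s d _ _ _; simp [insList]
  | cons x xs ih =>
    intro f s d hc hf hlk
    obtain ⟨h1, h2⟩ := hlk
    have hx : valOf parent s ++ [x] = valOf parent x :=
      (valOf_step parent x s f h1 hc (by simp at hf; omega)).symm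
    have hcx : chainOk parent (f + 1) x = true := by simp [chainOk, h1, hc]
    simp only [List.foldl_cons, insList, hx]
    have := ih (f + 1) x (d.insert x (valOf parent x)) hcx (by simp at hf ⊢; omega) h2
    simpa [insList] using this

theorem climbB_eq (parent : List (String × Option String)) :
    ∀ (f : Nat) (res : PySem.Dict String (List String)) (acc : List String) (v : String),
      chainOk parent f v = true →
      ∃ chain stop,
        climbB parent f res acc v = some (acc ++ chain, stop) ∧
        linked parent stop chain.reverse ∧
        (chain ++ [stop]).head? = some v ∧
        (∃ f', f' + chain.length ≤ f ∧ chainOk parent f' stop = true) ∧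
        ((res.contains stop = true ∧ miss parent res f v = chain.reverse) ∨
         (res.contains stop = false ∧ List.lookup stop parent = some none ∧
           miss parent res f v = stop :: chain.reverse)) := by
  intro f
  induction f with
  | zero => intro res acc v h; simp [chainOk] at h
  | succ f ih =>
    intro res acc v h
    simp only [chainOk] at h
    by_cases hct : res.contains v = true
    · refine ⟨[], v, ?_, trivial, by simp, ⟨f + 1, by simp, by simp [chainOk]; exact h⟩, ?_⟩
      · simp [climbB, hct]
      · left
        refine ⟨hct, ?_⟩
        have : (res.get? v).isSome = true := by
          rw [← PySem.Dict.contains_eq_isSome_get?]; exact hct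
        simp [miss, this]
    · have hct' : res.contains v = false := by simpa using hct
      have hget : (res.get? v).isSome = false := by
        rw [← PySem.Dict.contains_eq_isSome_get?]; exact hct'
      cases hl : List.lookup v parent with
      | none => simp [hl] at h
      | some o =>
        cases o with
        | none =>
          refine ⟨[], v, ?_, trivial, by simp, ⟨f + 1, by simp, by simp [chainOk, hl]⟩, ?_⟩
          · simp [climbB, hct', hl]
          · right; exact ⟨hct', hl, by simp [miss, hget, hl]⟩
        | some p =>
          simp only [hl] at h
          obtain ⟨chain, stop, hcl, hlk, hhd, ⟨f', hf', hcs⟩, hdisj⟩ := ih res (acc ++ [v]) p h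
          refine ⟨v :: chain, stop, ?_, ?_, by simp, ⟨f', by simp; omega, hcs⟩, ?_⟩
          · simp only [climbB, hct', hl]
            rw [hcl]; simp
          · -- linked parent stop (chain.reverse ++ [v])
            show linked parent stop ((v :: chain).reverse)
            simp only [List.reverse_cons]
            apply linked_snoc parent chain.reverse stop v hlk
            have : (chain.reverse.getLast?).getD stop = p := by
              cases chain with
              | nil => simp at hhd ⊢; simpa using hhd
              | cons a as =>
                simp at hhd
                simp [List.getLast?_reverse]
                simp [hhd]
            rw [this]; exact hl
          · rcases hdisj with ⟨hc1, hm⟩ | ⟨hc1, hroot, hm⟩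
            · left
              refine ⟨hc1, ?_⟩
              simp [miss, hget, hl, hm]
            · right
              refine ⟨hc1, hroot, ?_⟩
              simp [miss, hget, hl, hm]

theorem stepB_eq (parent : List (String × Option String))
    (res : PySem.Dict String (List String)) (v : String)
    (hI : AncInv parent res) (hc : chainOk parent (parent.length + 1) v = true) :
    stepB parent res v =
      some (insList parent res (miss parent res (parent.length + 1) v)) := by
  obtain ⟨chain, stop, hcl, hlk, hhd, ⟨f', hf', hcs⟩, hdisj⟩ :=
    climbB_eq parent (parent.length + 1) res [] v hc
  simp only [stepB, hcl, List.nil_append]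
  rcases hdisj with ⟨hc1, hm⟩ | ⟨hc1, hroot, hm⟩
  · -- stop already in res
    have hgs : ∃ l, res.get? stop = some l := by
      have : (res.get? stop).isSome = true := by
        rw [← PySem.Dict.contains_eq_isSome_get?]; exact hc1
      exact Option.isSome_iff_exists.mp this
    obtain ⟨l, hgl⟩ := hgs
    have hval : res.getD stop [] = valOf parent stop := by
      rw [PySem.Dict.getD_eq_get?_getD, hgl]
      simp [valOf, hI stop l hgl]
    rw [hm]
    simp only [hc1, if_true, hval]
    rw [unwind_eq parent chain.reverse f' stop res hcs (by simpa using hf') hlk]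
  · -- stop is a fresh root
    have hval : [stop] = valOf parent stop := (valOf_root parent stop hroot).symm
    rw [hm]
    simp only [hc1, Bool.false_eq_true, if_false, hval]
    have := unwind_eq parent chain.reverse f' stop
      (res.insert stop (valOf parent stop)) hcs (by simpa using hf') hlk
    rw [this]
    simp [insList]

theorem fold_eq (parent : List (String × Option String)) :
    ∀ (bs : List (String × List String)) (res : PySem.Dict String (List String)),
      AncInv parent res →
      (∀ kv ∈ bs, chainOk parent (parent.length + 1) kv.1 = true) →
      ∃ d,
        bs.foldl
          (fun st kv =>
            match st with
            | none => none
            | some anc => (getAncA parent (parent.length + 1) anc kv.1).map (·.1))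
          (some res) = some d ∧
        bs.foldl
          (fun st kv =>
            match st with
            | none => none
            | some r => stepB parent r kv.1)
          (some res) = some d := by
  intro bs
  induction bs with
  | nil => intro res hI _; exact ⟨res, rfl, rfl⟩
  | cons kv bs ih =>
    intro res hI hks
    have hck : chainOk parent (parent.length + 1) kv.1 = true := hks kv (by simp)
    have hA := getAncA_eq parent (parent.length + 1) res kv.1 hI hck (by omega)
    have hB := stepB_eq parent res kv.1 hI hck
    have hI' : AncInv parent (insList parent res (miss parent res (parent.length + 1) kv.1)) :=
      ancInv_insList parent _ res hI
        (miss_mem_chainOk parent (parent.length + 1) res kv.1 hck (by omega))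
    obtain ⟨d, h1, h2⟩ := ih _ hI' (fun kv' hkv' => hks kv' (by simp [hkv']))
    exact ⟨d, by simp only [List.foldl_cons, hA, Option.map_some]; exact h1,
           by simp only [List.foldl_cons, hB]; exact h2⟩

theorem ancInv_empty (parent : List (String × Option String)) :
    AncInv parent PySem.Dict.empty := by
  intro k l h
  simp [PySem.Dict.get?_empty] at h

-- ===== VERDICT (by name: the statement is the Claim_ definition above) =====
theorem build_ancestors_spec : Claim_equal_build_ancestors := by
  intro bags parent _ hPre
  unfold Spec_build_ancestors build_ancestors build_ancestors_alt
  have hks : ∀ kv ∈ bags, chainOk parent (parent.length + 1) kv.1 = true := by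
    intro kv hkv
    exact List.all_eq_true.mp hPre kv hkv
  obtain ⟨d, h1, h2⟩ := fold_eq parent bags PySem.Dict.empty (ancInv_empty parent) hks
  rw [h1, h2]
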